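-- pv_equiv track=rewrite | github.com/pypi-data/pypi-mirror-398 | packages/lulzprime/lulzprime-0.2.0-py3-none-any.whl/lulzprime/pi.py | _create_segment_ranges
-- ===== SOURCE A (Python) =====
-- def _create_segment_ranges(start: int, end: int, num_workers: int) -> list[tuple[int, int]]:
--     """
--     Divide range [start, end] into num_workers disjoint segments.
--
--     Segments are created deterministically with fixed boundaries based on
--     start, end, and num_workers. This ensures deterministic aggregation.
--
--     Args:
--         start: Start of range (inclusive)
--         end: End of range (inclusive)
--         num_workers: Number of segments to create
--
--     Returns:
--         List of (segment_start, segment_end) tuples in ascending order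
--
--     Example:
--         >>> _create_segment_ranges(100, 200, 4)
--         [(100, 124), (125, 149), (150, 174), (175, 200)]
--     """
--     if start > end:
--         return []
--     if num_workers <= 0:
--         raise ValueError(f"num_workers must be positive, got {num_workers}")
--
--     total_range = end - start + 1
--     segment_size = total_range // num_workers
--     remainder = total_range % num_workers
--
--     segments = []
--     current = start
--
--     for i in range(num_workers):
--         # Distribute remainder across first segments
--         size = segment_size + (1 if i < remainder else 0)
--         segment_start = current
--         segment_end = current + size - 1
--
--         if segment_start > end:
--             break
--
--         segments.append((segment_start, min(segment_end, end)))
--         current = segment_end + 1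
--
--     return segments
-- ===== SOURCE B (Python) =====
-- def _create_segment_ranges(start: int, end: int, num_workers: int) -> list[tuple[int, int]]:
--     """Closed-form segment boundaries: each segment is computed directly from its index."""
--     if start > end:
--         return []
--     if num_workers <= 0:
--         raise ValueError(f"num_workers must be positive, got {num_workers}")
--
--     total_range = end - start + 1
--     segment_size = total_range // num_workers
--     remainder = total_range % num_workers
--     # A stops early (size-0 segments) once the range is exhausted; that happens
--     # exactly when segment_size == 0, after `remainder` (= total_range) segments.
--     count = num_workers if segment_size > 0 else remainder
--
--     return [
--         (
--             start + i * segment_size + min(i, remainder),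
--             start + (i + 1) * segment_size + min(i + 1, remainder) - 1,
--         )
--         for i in range(count)
--     ]
-- ===== Notes on version B (the rewrite author's own statement) =====
-- stated objective: simpler
-- what changed: Replaces A's loop that threads a running cursor `current` (with an early break on size-0 segments) by a closed-form list comprehension: segment i's boundaries are computed directly from i, and the number of segments to emit is determined up front.
import Mathlib
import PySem

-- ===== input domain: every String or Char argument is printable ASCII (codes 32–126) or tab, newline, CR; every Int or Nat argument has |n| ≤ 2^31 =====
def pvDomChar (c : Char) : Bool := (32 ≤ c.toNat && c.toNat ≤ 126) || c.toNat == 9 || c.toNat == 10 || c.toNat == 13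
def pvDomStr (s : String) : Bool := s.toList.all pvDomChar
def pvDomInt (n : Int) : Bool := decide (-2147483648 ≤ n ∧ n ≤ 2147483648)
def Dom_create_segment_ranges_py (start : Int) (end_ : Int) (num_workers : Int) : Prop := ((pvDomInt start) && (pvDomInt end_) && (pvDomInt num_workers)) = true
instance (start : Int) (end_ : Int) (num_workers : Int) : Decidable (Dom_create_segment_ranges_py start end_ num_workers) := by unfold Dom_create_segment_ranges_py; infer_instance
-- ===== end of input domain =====

-- B replaces A's running-cursor loop by a closed-form comprehension: each segment's
-- boundaries are computed directly from its index (objective: simpler).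

-- ===== PORT A =====
-- A's `for i in range(num_workers)` loop with its early `break`, transliterated as a
-- recursion over the index list; state = (current, segments), segments appended at the back.
def createLoopA (end_ ss r : Int) : List Int → Int → List (Int × Int) → List (Int × Int)
  | [], _, segments => segments
  | i :: rest, current, segments =>
    let size := ss + (if i < r then 1 else 0)
    let segStart := current
    let segEnd := current + size - 1
    if segStart > end_ then segments
    else createLoopA end_ ss r rest (segEnd + 1) (segments ++ [(segStart, min segEnd end_)])

def create_segment_ranges_py (start : Int) (end_ : Int) (num_workers : Int) : List (Int × Int) :=
  if start > end_ then []
  else if num_workers ≤ 0 then []   -- Python raises ValueError here; excluded by Pre_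
  else
    let total_range := end_ - start + 1
    let segment_size := PySem.Int.floordiv total_range num_workers
    let remainder := PySem.Int.mod total_range num_workers
    createLoopA end_ segment_size remainder (PySem.List.pyRange 0 num_workers 1) start []

-- ===== PORT B =====
def create_segment_ranges_py_alt (start : Int) (end_ : Int) (num_workers : Int) : List (Int × Int) :=
  if start > end_ then []
  else if num_workers ≤ 0 then []   -- Python raises ValueError here; excluded by Pre_
  else
    let total_range := end_ - start + 1
    let segment_size := PySem.Int.floordiv total_range num_workers
    let remainder := PySem.Int.mod total_range num_workers
    let count := if 0 < segment_size then num_workers else remainder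
    (List.range count.toNat).map (fun (i : Nat) =>
      (start + (i : Int) * segment_size + min (i : Int) remainder,
       start + ((i : Int) + 1) * segment_size + min ((i : Int) + 1) remainder - 1))

-- ===== PRECONDITION & SPEC =====
-- Pre_ excludes exactly the inputs where A raises ValueError (num_workers ≤ 0 with a
-- non-empty range); B raises the same error there.
def Pre_create_segment_ranges_py (start : Int) (end_ : Int) (num_workers : Int) : Prop :=
  start > end_ ∨ 0 < num_workers
instance (start : Int) (end_ : Int) (num_workers : Int) : Decidable (Pre_create_segment_ranges_py start end_ num_workers) := by unfold Pre_create_segment_ranges_py; infer_instance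

def pvWitness_create_segment_ranges_py : Int × Int × Int := (100, 200, 4)

def Spec_create_segment_ranges_py (start : Int) (end_ : Int) (num_workers : Int) (out : List (Int × Int)) : Prop := out = create_segment_ranges_py_alt start end_ num_workers
instance (start : Int) (end_ : Int) (num_workers : Int) (out : List (Int × Int)) : Decidable (Spec_create_segment_ranges_py start end_ num_workers out) := by unfold Spec_create_segment_ranges_py; infer_instance

-- ===== CLAIM (what is proved, stated in full; the proofs are below) =====
def Claim_equal_create_segment_ranges_py : Prop := ∀ (start : Int) (end_ : Int) (num_workers : Int), Dom_create_segment_ranges_py start end_ num_workers → Pre_create_segment_ranges_py start end_ num_workers → Spec_create_segment_ranges_py start end_ num_workers (create_segment_ranges_py start end_ num_workers)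

-- ===== LEMMAS AND PROOFS =====

-- Segment i of B's closed form, as a function of its index.
def segOf (start ss r : Int) (j : Nat) : Int × Int :=
  (start + (j : Int) * ss + min (j : Int) r,
   start + ((j : Int) + 1) * ss + min ((j : Int) + 1) r - 1)

-- The main loop invariant: with the cursor at position start + i*ss + min i r,
-- running A's loop over the remaining indices i, i+1, …, i+k-1 appends exactly
-- segments i … count-1 of the closed form.
theorem createLoopA_eq (start end_ ss r : Int) (n count : Nat)
    (hss : 0 ≤ ss) (hrn : r < (n : Int))
    (htot : ss * (n : Int) + r = end_ - start + 1)
    (hcount : (count : Int) = if 0 < ss then (n : Int) else r) :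
    ∀ (k i : Nat) (acc : List (Int × Int)), i + k = n → i ≤ count →
      createLoopA end_ ss r (List.map (fun (j : Nat) => (j : Int)) (List.range' i k))
        (start + (i : Int) * ss + min (i : Int) r) acc
      = acc ++ List.map (segOf start ss r) (List.range' i (count - i)) := by
  intro k
  induction k with
  | zero =>
    intro i acc hik hicount
    have hcn : count ≤ n := by
      by_cases h : 0 < ss
      · rw [if_pos h] at hcount; omega
      · rw [if_neg h] at hcount; omega
    have : i = count := by omega
    subst this
    simp [createLoopA]
  | succ k ih =>
    intro i acc hik hicount
    rcases lt_or_eq_of_le hicount with hlt | heq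
    · -- i < count : the loop emits segment i and recurses
      have hnext : ((i : Int) + 1) * ss + min ((i : Int) + 1) r ≤ end_ - start + 1 := by
        by_cases h : 0 < ss
        · rw [if_pos h] at hcount
          have h1 : ((i : Int) + 1) * ss ≤ ss * (n : Int) := by
            rw [mul_comm ss]
            exact mul_le_mul_of_nonneg_right (by omega) hss
          have h2 : min ((i : Int) + 1) r ≤ r := min_le_right _ _
          omega
        · rw [if_neg h] at hcount
          have hss0 : ss = 0 := by omega
          subst hss0
          omega
      have hcur : (i : Int) * ss + min (i : Int) r < ((i : Int) + 1) * ss + min ((i : Int) + 1) r := by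
        by_cases h : 0 < ss
        · have h1 : (i : Int) * ss < ((i : Int) + 1) * ss :=
            mul_lt_mul_of_pos_right (by omega) h
          have h2 : min (i : Int) r ≤ min ((i : Int) + 1) r :=
            min_le_min (by omega) le_rfl
          omega
        · rw [if_neg h] at hcount
          have hss0 : ss = 0 := by omega
          subst hss0
          omega
      have hnobreak : ¬ (start + (i : Int) * ss + min (i : Int) r > end_) := by omega
      have hsize : start + (i : Int) * ss + min (i : Int) r
            + (ss + (if (i : Int) < r then 1 else 0)) - 1
          = start + ((i : Int) + 1) * ss + min ((i : Int) + 1) r - 1 := by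
        by_cases h : (i : Int) < r
        · rw [if_pos h, min_eq_left (by omega), min_eq_left (by omega)]; ring
        · rw [if_neg h, min_eq_right (by omega), min_eq_right (by omega)]; ring
      rw [List.range'_succ, List.map_cons]
      simp only [createLoopA, if_neg hnobreak]
      rw [hsize,
        show min (start + ((i : Int) + 1) * ss + min ((i : Int) + 1) r - 1) end_
            = start + ((i : Int) + 1) * ss + min ((i : Int) + 1) r - 1 from
          min_eq_left (by omega)]
      have hrec := ih (i + 1) (acc ++ [(start + (i : Int) * ss + min (i : Int) r,
          start + ((i : Int) + 1) * ss + min ((i : Int) + 1) r - 1)]) (by omega) (by omega)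
      push_cast at hrec
      have harg : start + ((i : Int) + 1) * ss + min ((i : Int) + 1) r - 1 + 1
          = start + ((i : Int) + 1) * ss + min ((i : Int) + 1) r := by ring
      rw [harg, hrec]
      have hsplit : count - i = (count - (i + 1)) + 1 := by omega
      rw [hsplit, List.range'_succ, List.map_cons, List.append_assoc]
      simp [segOf]
    · -- i = count : the break fires (only possible when ss = 0)
      subst heq
      have hss0 : ss = 0 := by
        by_cases h : 0 < ss
        · rw [if_pos h] at hcount; omega
        · omega
      subst hss0
      rw [if_neg (by omega)] at hcount
      have hbreak : start + (i : Int) * 0 + min (i : Int) r > end_ := by omega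
      rw [List.range'_succ, List.map_cons]
      simp only [createLoopA, if_pos hbreak]
      simp

-- ===== VERDICT (by name: the statement is the Claim_ definition above) =====
theorem create_segment_ranges_py_spec : Claim_equal_create_segment_ranges_py := by
  intro start end_ num_workers _ hpre
  unfold Spec_create_segment_ranges_py create_segment_ranges_py create_segment_ranges_py_alt
  by_cases h1 : start > end_
  · simp [h1]
  · simp only [if_neg h1]
    have hnw : 0 < num_workers := by
      rcases hpre with h | h
      · exact absurd h h1
      · exact h
    rw [if_neg (show ¬ num_workers ≤ 0 by omega), if_neg (show ¬ num_workers ≤ 0 by omega)]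
    set total := end_ - start + 1 with htotdef
    set ss := PySem.Int.floordiv total num_workers with hssdef
    set r := PySem.Int.mod total num_workers with hrdef
    have hnwne : num_workers ≠ 0 := by omega
    have hssed : ss = total / num_workers := PySem.Int.floordiv_eq_ediv_of_pos hnw
    have hred : r = total % num_workers := PySem.Int.mod_eq_emod_of_pos hnw
    have htotpos : 0 < total := by omega
    have hr0 : 0 ≤ r := by rw [hred]; exact Int.emod_nonneg _ hnwne
    have hrlt : r < num_workers := by rw [hred]; exact Int.emod_lt_of_pos _ hnw
    have hss0 : 0 ≤ ss := by rw [hssed]; exact Int.ediv_nonneg (by omega) (by omega)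
    have htot : ss * num_workers + r = end_ - start + 1 := by
      rw [hssed, hred, mul_comm]
      have := Int.mul_ediv_add_emod total num_workers
      omega
    set n : Nat := num_workers.toNat with hndef
    have hn : (n : Int) = num_workers := Int.toNat_of_nonneg (by omega)
    set countN : Nat := (if 0 < ss then num_workers else r).toNat with hcdef
    have hcount : (countN : Int) = if 0 < ss then num_workers else r := by
      by_cases h : 0 < ss <;> simp [hcdef, h] <;> omega
    have hmain := createLoopA_eq start end_ ss r n countN hss0 (by omega)
      (by rw [hn]; exact htot) (by rw [hcount, hn]) n 0 [] (by omega) (by positivity)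
    have hrange : PySem.List.pyRange 0 num_workers 1
        = List.map (fun (j : Nat) => (j : Int)) (List.range' 0 n) := by
      rw [PySem.List.pyRange_one, ← List.range_eq_range']
      simp [hndef]
    rw [hrange]
    have hpos0 : start + (0 : Int) * ss + min (0 : Int) r = start := by
      rw [min_eq_left hr0]; ring
    simp only [Nat.cast_zero] at hmain
    rw [hpos0] at hmain
    rw [hmain]
    simp [segOf, List.range_eq_range']
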